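-- pv_equiv track=rewrite | github.com/DisasterCthulhu/aoc | 2020/days/day14.py | process_mask
-- ===== SOURCE A (Python) =====
-- def process_mask(mask):
--   bitand = pow(2, 36)-1
--   bitor = 0
--   for i, c in enumerate(mask[::-1]):
--     if c == "X":
--       continue
--     if c == "1":
--       bitor += pow(2, i)
--     if c == "0":
--       bitand -= pow(2, i)
--
--   return (bitand, bitor)
-- ===== SOURCE B (Python) =====
-- def process_mask(mask):
--   bitor = 0
--   zeros = 0
--   for c in mask:
--     bitor = bitor * 2 + (1 if c == "1" else 0)
--     zeros = zeros * 2 + (1 if c == "0" else 0)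
--   return (pow(2, 36) - 1 - zeros, bitor)
-- ===== Notes on version B (the rewrite author's own statement) =====
-- stated objective: alternative
-- what changed: Replaces the reversed-string enumerate loop with pow(2,i) per bit by a single left-to-right Horner scan (acc*2 + bit) accumulating the OR value and the zero-mask, then computes bitand as 2**36-1 - zeros.
import Mathlib
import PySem

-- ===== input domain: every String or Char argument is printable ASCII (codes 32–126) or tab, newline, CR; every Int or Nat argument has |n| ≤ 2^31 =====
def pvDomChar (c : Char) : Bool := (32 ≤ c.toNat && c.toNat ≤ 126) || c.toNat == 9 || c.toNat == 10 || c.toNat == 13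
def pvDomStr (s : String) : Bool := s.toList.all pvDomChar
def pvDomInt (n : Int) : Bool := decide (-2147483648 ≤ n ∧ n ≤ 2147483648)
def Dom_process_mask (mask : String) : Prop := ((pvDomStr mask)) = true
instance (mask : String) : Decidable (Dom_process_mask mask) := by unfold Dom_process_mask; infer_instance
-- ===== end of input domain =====

-- B replaces A's reversed-enumerate loop with a single left-to-right Horner scan (no reversal, no pow): alternative decomposition, same cost.


-- ===== PORT A =====
-- the for-loop over enumerate(mask[::-1]) with state (bitand, bitor) and index i
def pmLoop (bitand bitor : Int) (i : Nat) : List Char → Int × Int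
  | [] => (bitand, bitor)
  | c :: rest =>
    if c = 'X' then pmLoop bitand bitor (i + 1) rest   -- continue
    else pmLoop (if c = '0' then bitand - 2 ^ i else bitand)
                (if c = '1' then bitor + 2 ^ i else bitor) (i + 1) rest

def process_mask (mask : String) : Int × Int :=
  -- mask[::-1] is the reversed string (PySem.Str.slice?_none_none_neg_one)
  pmLoop (2 ^ 36 - 1) 0 0 mask.toList.reverse

-- ===== PORT B =====
def process_mask_alt (mask : String) : Int × Int :=
  let p := mask.toList.foldl
      (fun (p : Int × Int) c =>
        (p.1 * 2 + (if c = '1' then 1 else 0), p.2 * 2 + (if c = '0' then 1 else 0)))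
      (0, 0)
  (2 ^ 36 - 1 - p.2, p.1)

-- ===== PRECONDITION & SPEC =====
def Spec_process_mask (mask : String) (out : Int × Int) : Prop := out = process_mask_alt mask
instance (mask : String) (out : Int × Int) : Decidable (Spec_process_mask mask out) := by unfold Spec_process_mask; infer_instance

-- ===== CLAIM (what is proved, stated in full; the proofs are below) =====
def Claim_equal_process_mask : Prop := ∀ (mask : String), Dom_process_mask mask → Spec_process_mask mask (process_mask mask)

-- ===== LEMMAS AND PROOFS =====

-- little-endian value of a bit predicate over a char list
def lv (b : Char → Int) : List Char → Int
  | [] => 0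
  | c :: t => b c + 2 * lv b t

theorem lv_append (b : Char → Int) (xs : List Char) (c : Char) :
    lv b (xs ++ [c]) = lv b xs + 2 ^ xs.length * b c := by
  induction xs with
  | nil => simp [lv]
  | cons x t ih => simp [lv, ih, List.length_cons]; ring

def b1 (c : Char) : Int := if c = '1' then 1 else 0
def b0 (c : Char) : Int := if c = '0' then 1 else 0

theorem pmLoop_eq (l : List Char) : ∀ (a o : Int) (i : Nat),
    pmLoop a o i l = (a - 2 ^ i * lv b0 l, o + 2 ^ i * lv b1 l) := by
  induction l with
  | nil => intro a o i; simp [pmLoop, lv]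
  | cons c t ih =>
    intro a o i
    simp only [pmLoop, lv, ih, b0, b1]
    by_cases hx : c = 'X' <;> by_cases h0 : c = '0' <;> by_cases h1 : c = '1' <;>
      simp_all [pow_succ, Prod.ext_iff] <;> constructor <;> ring

theorem bfold_eq (l : List Char) : ∀ (bo z : Int),
    l.foldl (fun (p : Int × Int) c =>
        (p.1 * 2 + (if c = '1' then 1 else 0), p.2 * 2 + (if c = '0' then 1 else 0))) (bo, z)
      = (bo * 2 ^ l.length + lv b1 l.reverse, z * 2 ^ l.length + lv b0 l.reverse) := by
  induction l with
  | nil => intro bo z; simp [lv]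
  | cons c t ih =>
    intro bo z
    simp only [List.foldl_cons, ih, List.reverse_cons, lv_append, List.length_reverse,
      List.length_cons, b0, b1]
    simp only [Prod.ext_iff, pow_succ]
    constructor <;> ring

-- ===== VERDICT (by name: the statement is the Claim_ definition above) =====
theorem process_mask_spec : Claim_equal_process_mask := by
  intro mask _
  show process_mask mask = process_mask_alt mask
  simp only [process_mask, process_mask_alt, pmLoop_eq, bfold_eq]
  simp
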